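-- pv_equiv track=rewrite | github.com/mattv8/ragtime | ragtime/indexer/background_tasks.py | _synthesize_incomplete_response
-- ===== SOURCE A (Python) =====
-- from typing import Any, Dict, List, Optional, Union
--
-- def _synthesize_incomplete_response(
--     events: list[dict[str, Any]],
--     tool_calls: list[dict[str, Any]],
--     hit_max_iterations: bool,
-- ) -> Optional[str]:
--     """Build a visible fallback only when a run ended cleanly without final text."""
--     had_tool_activity = bool(tool_calls) or any(
--         ev.get("type") == "tool" for ev in events
--     )
--     had_reasoning_activity = any(ev.get("type") == "reasoning" for ev in events)
--
--     if not (had_tool_activity or had_reasoning_activity):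
--         return None
--
--     last_tool_name = next(
--         (
--             str(ev.get("tool"))
--             for ev in reversed(events)
--             if ev.get("type") == "tool" and ev.get("tool")
--         ),
--         "tool",
--     )
--
--     if hit_max_iterations:
--         return (
--             "I finished this run without emitting a final answer text "
--             "before hitting the iteration limit. "
--             "Please send Continue so I can resume from the current state."
--         )
--
--     if had_tool_activity:
--         return (
--             "I completed tool activity but did not emit a final answer text "
--             f"(last tool: {last_tool_name}). "
--             "Please send Continue and I will finalize the response."
--         )
--
--     return (
--         "I emitted reasoning but no final answer text in this run. "
--         "Please send Continue and I will complete the response."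
--     )
-- ===== SOURCE B (Python) =====
-- from typing import Any, Optional
--
--
-- def _synthesize_incomplete_response(
--     events: list[dict[str, Any]],
--     tool_calls: list[dict[str, Any]],
--     hit_max_iterations: bool,
-- ) -> Optional[str]:
--     """Single pass over events with three accumulators instead of three scans."""
--     had_tool = bool(tool_calls)
--     had_reasoning = False
--     last_tool_name = "tool"
--     for ev in events:
--         t = ev.get("type")
--         if t == "tool":
--             had_tool = True
--             if ev.get("tool"):
--                 last_tool_name = str(ev.get("tool"))
--         elif t == "reasoning":
--             had_reasoning = True
--
--     if not (had_tool or had_reasoning):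
--         return None
--
--     if hit_max_iterations:
--         return (
--             "I finished this run without emitting a final answer text "
--             "before hitting the iteration limit. "
--             "Please send Continue so I can resume from the current state."
--         )
--
--     if had_tool:
--         return (
--             "I completed tool activity but did not emit a final answer text "
--             f"(last tool: {last_tool_name}). "
--             "Please send Continue and I will finalize the response."
--         )
--
--     return (
--         "I emitted reasoning but no final answer text in this run. "
--         "Please send Continue and I will complete the response."
--     )
-- ===== Notes on version B (the rewrite author's own statement) =====
-- stated objective: simpler
-- what changed: Replaces A's three separate scans (two any() passes and a reversed-generator next()) with one forward pass maintaining had_tool, had_reasoning and a last-wins last_tool_name accumulator.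
import Mathlib
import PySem

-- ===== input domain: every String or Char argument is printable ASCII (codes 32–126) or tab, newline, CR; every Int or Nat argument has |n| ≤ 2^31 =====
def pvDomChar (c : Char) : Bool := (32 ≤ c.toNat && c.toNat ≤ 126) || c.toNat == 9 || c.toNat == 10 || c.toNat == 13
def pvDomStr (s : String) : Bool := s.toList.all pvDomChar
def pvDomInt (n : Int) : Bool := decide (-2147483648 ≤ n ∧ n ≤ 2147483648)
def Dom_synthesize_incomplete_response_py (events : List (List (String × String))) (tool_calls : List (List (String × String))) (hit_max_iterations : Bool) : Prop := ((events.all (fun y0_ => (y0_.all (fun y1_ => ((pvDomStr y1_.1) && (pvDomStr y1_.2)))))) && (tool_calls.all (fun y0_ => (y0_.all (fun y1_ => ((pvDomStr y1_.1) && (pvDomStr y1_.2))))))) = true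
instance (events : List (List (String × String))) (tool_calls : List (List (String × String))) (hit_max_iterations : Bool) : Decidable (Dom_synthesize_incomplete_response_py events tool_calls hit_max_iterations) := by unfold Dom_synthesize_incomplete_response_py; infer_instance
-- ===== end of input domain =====

-- B replaces A's three separate scans over events by one forward pass with accumulators (same cost class, simpler flow).


-- Python truthiness of an Optional[str]: None and "" are falsy.
def pvTruthy (o : Option String) : Bool :=
  match o with
  | some s => decide (s ≠ "")
  | none => false

-- ev.get(k): first-match association-list lookup (Python dict.get)
def pvGet (ev : List (String × String)) (k : String) : Option String :=
  PySem.Dict.get? (PySem.Dict.mk ev) k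

def pvMsgLimit : String :=
  "I finished this run without emitting a final answer text before hitting the iteration limit. Please send Continue so I can resume from the current state."
def pvMsgToolPre : String := "I completed tool activity but did not emit a final answer text (last tool: "
def pvMsgToolPost : String := "). Please send Continue and I will finalize the response."
def pvMsgReasoning : String :=
  "I emitted reasoning but no final answer text in this run. Please send Continue and I will complete the response."

-- ===== PORT A =====
def synthesize_incomplete_response_py (events : List (List (String × String))) (tool_calls : List (List (String × String))) (hit_max_iterations : Bool) : Option String :=
  let had_tool_activity := decide (tool_calls ≠ []) ||
    events.any (fun ev => pvGet ev "type" == some "tool")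
  let had_reasoning_activity := events.any (fun ev => pvGet ev "type" == some "reasoning")
  if !(had_tool_activity || had_reasoning_activity) then none
  else
    -- next((str(ev.get("tool")) for ev in reversed(events) if ...), "tool")
    let last_tool_name :=
      ((events.reverse.find? (fun ev =>
          (pvGet ev "type" == some "tool") && pvTruthy (pvGet ev "tool"))).map
        (fun ev => (pvGet ev "tool").getD "None")).getD "tool"
    if hit_max_iterations then some pvMsgLimit
    else if had_tool_activity then some (pvMsgToolPre ++ last_tool_name ++ pvMsgToolPost)
    else some pvMsgReasoning

-- ===== PORT B =====
-- one step of B's single loop over events; state = (had_tool, had_reasoning, last_tool_name)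
def pvStepB (st : Bool × Bool × String) (ev : List (String × String)) : Bool × Bool × String :=
  let t := pvGet ev "type"
  if t == some "tool" then
    (true, st.2.1,
      if pvTruthy (pvGet ev "tool") then (pvGet ev "tool").getD "None" else st.2.2)
  else if t == some "reasoning" then (st.1, true, st.2.2)
  else st

def synthesize_incomplete_response_py_alt (events : List (List (String × String))) (tool_calls : List (List (String × String))) (hit_max_iterations : Bool) : Option String :=
  let st := events.foldl pvStepB (decide (tool_calls ≠ []), false, "tool")
  if !(st.1 || st.2.1) then none
  else if hit_max_iterations then some pvMsgLimit
  else if st.1 then some (pvMsgToolPre ++ st.2.2 ++ pvMsgToolPost)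
  else some pvMsgReasoning

-- ===== PRECONDITION & SPEC =====
def Spec_synthesize_incomplete_response_py (events : List (List (String × String))) (tool_calls : List (List (String × String))) (hit_max_iterations : Bool) (out : Option String) : Prop := out = synthesize_incomplete_response_py_alt events tool_calls hit_max_iterations
instance (events : List (List (String × String))) (tool_calls : List (List (String × String))) (hit_max_iterations : Bool) (out : Option String) : Decidable (Spec_synthesize_incomplete_response_py events tool_calls hit_max_iterations out) := by unfold Spec_synthesize_incomplete_response_py; infer_instance

-- ===== CLAIM (what is proved, stated in full; the proofs are below) =====
def Claim_equal_synthesize_incomplete_response_py : Prop := ∀ (events : List (List (String × String))) (tool_calls : List (List (String × String))) (hit_max_iterations : Bool), Dom_synthesize_incomplete_response_py events tool_calls hit_max_iterations → Spec_synthesize_incomplete_response_py events tool_calls hit_max_iterations (synthesize_incomplete_response_py events tool_calls hit_max_iterations)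

-- ===== LEMMAS AND PROOFS =====

-- B's fold computes: A's two any-scans and A's reversed-first-match (= forward last-wins) name.
theorem pvStepB_fold_spec (events : List (List (String × String))) (a b : Bool) (l : String) :
    events.foldl pvStepB (a, b, l) =
      (a || events.any (fun ev => pvGet ev "type" == some "tool"),
       b || events.any (fun ev => pvGet ev "type" == some "reasoning"),
       ((events.reverse.find? (fun ev =>
           (pvGet ev "type" == some "tool") && pvTruthy (pvGet ev "tool"))).map
         (fun ev => (pvGet ev "tool").getD "None")).getD l) := by
  induction events generalizing a b l with
  | nil => simp
  | cons ev evs ih =>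
    simp only [List.foldl_cons, List.any_cons, List.reverse_cons, List.find?_append, pvStepB]
    cases htool : (pvGet ev "type" == some "tool") with
    | true =>
      have ht : pvGet ev "type" = some "tool" := by simpa using htool
      cases htr : pvTruthy (pvGet ev "tool") with
      | true => rw [ih]; simp [ht, htr]
      | false => rw [ih]; simp [ht, htr]
    | false =>
      cases hreas : (pvGet ev "type" == some "reasoning") with
      | true => rw [ih]; simp [htool]
      | false => rw [ih]; simp [htool]

-- ===== VERDICT (by name: the statement is the Claim_ definition above) =====
theorem synthesize_incomplete_response_py_spec : Claim_equal_synthesize_incomplete_response_py := by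
  intro events tool_calls hit_max_iterations _
  unfold Spec_synthesize_incomplete_response_py
  unfold synthesize_incomplete_response_py synthesize_incomplete_response_py_alt
  rw [pvStepB_fold_spec]
  simp
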